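-- pv_equiv track=rewrite | github.com/pranavks12345/finance_markets_kg | ner_for_all.py | _reconstruct_entities_from_bio
-- ===== SOURCE A (Python) =====
-- from typing import List, Dict, Tuple, Set, Optional
--
-- def _reconstruct_entities_from_bio(tokens: List[str], labels: List[str]) -> List[Dict]:
--     """Reconstruct entities from BIO tagging"""
--     entities = []
--     current_entity = None
--     current_tokens = []
--
--     for token, label in zip(tokens, labels):
--         if token.startswith('[') and token.endswith(']'):
--             continue
--
--         if label == 'O':
--             if current_entity and current_tokens:
--                 full_text = ""
--                 for t in current_tokens:
--                     if t.startswith('##'):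
--                         full_text += t[2:]
--                     else:
--                         if full_text and not full_text.endswith(' '):
--                             full_text += " " + t
--                         else:
--                             full_text += t
--
--                 if full_text.strip():
--                     entities.append({
--                         "text": full_text.strip(),
--                         "label": current_entity
--                     })
--
--             current_entity = None
--             current_tokens = []
--
--         else:
--             if '-' in label:
--                 bio_tag, entity_type = label.split('-', 1)
--             else:
--                 bio_tag, entity_type = 'B', label
--
--             if bio_tag == 'B':
--                 if current_entity and current_tokens:
--                     full_text = ""
--                     for t in current_tokens:
--                         if t.startswith('##'):
--                             full_text += t[2:]
--                         else:
--                             if full_text and not full_text.endswith(' '):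
--                                 full_text += " " + t
--                             else:
--                                 full_text += t
--
--                     if full_text.strip():
--                         entities.append({
--                             "text": full_text.strip(),
--                             "label": current_entity
--                         })
--
--                 current_entity = entity_type
--                 current_tokens = [token]
--
--             elif bio_tag == 'I' and entity_type == current_entity and current_tokens:
--                 current_tokens.append(token)
--
--     if current_entity and current_tokens:
--         full_text = ""
--         for t in current_tokens:
--             if t.startswith('##'):
--                 full_text += t[2:]
--             else:
--                 if full_text and not full_text.endswith(' '):
--                     full_text += " " + t
--                 else:
--                     full_text += t
--
--         if full_text.strip():
--             entities.append({
--                 "text": full_text.strip(),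
--                 "label": current_entity
--             })
--
--     return entities
-- ===== SOURCE B (Python) =====
-- from typing import List, Dict
--
-- def _reconstruct_entities_from_bio(tokens: List[str], labels: List[str]) -> List[Dict]:
--     """Two passes: segment the BIO stream, then render each segment."""
--     segments = []          # (entity_type, [tokens]) in order of their B tags
--     open_type = None       # entity type of the still-open segment, if any
--     for token, label in zip(tokens, labels):
--         if token.startswith('[') and token.endswith(']'):
--             continue
--         if label == 'O':
--             open_type = None
--         else:
--             bio, etype = label.split('-', 1) if '-' in label else ('B', label)
--             if bio == 'B':
--                 segments.append((etype, [token]))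
--                 open_type = etype
--             elif bio == 'I' and open_type == etype:
--                 segments[-1][1].append(token)
--
--     entities = []
--     for etype, toks in segments:
--         if not etype:
--             continue
--         text = ""
--         for t in toks:
--             if t.startswith('##'):
--                 text += t[2:]
--             elif text and not text.endswith(' '):
--                 text += " " + t
--             else:
--                 text += t
--         s = text.strip()
--         if s:
--             entities.append({"text": s, "label": etype})
--     return entities
-- ===== Notes on version B (the rewrite author's own statement) =====
-- stated objective: simpler
-- what changed: B separates the work into two passes - first segment the BIO stream into (entity_type, tokens) segments appended/extended in a list, then render and filter each segment once - eliminating A's triplicated inline render-and-flush block and its (entities, current_entity, current_tokens) flush state machine.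
import Mathlib
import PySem

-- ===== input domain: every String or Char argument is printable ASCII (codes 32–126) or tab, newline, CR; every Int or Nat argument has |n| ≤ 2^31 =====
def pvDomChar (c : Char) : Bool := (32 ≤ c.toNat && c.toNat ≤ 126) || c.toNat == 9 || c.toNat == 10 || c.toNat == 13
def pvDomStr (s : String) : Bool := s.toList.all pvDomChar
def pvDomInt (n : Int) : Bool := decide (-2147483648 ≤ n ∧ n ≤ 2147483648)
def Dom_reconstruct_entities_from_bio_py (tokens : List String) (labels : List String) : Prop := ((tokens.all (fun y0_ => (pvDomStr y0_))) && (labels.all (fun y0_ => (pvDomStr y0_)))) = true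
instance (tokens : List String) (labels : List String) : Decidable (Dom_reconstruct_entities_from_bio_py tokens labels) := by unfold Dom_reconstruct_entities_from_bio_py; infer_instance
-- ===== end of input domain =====

-- B replaces A's one-pass state machine with its triplicated inline render-and-flush block
-- by two passes (segment the BIO stream, then render each segment); objective: simpler.

-- the `bio_tag, entity_type = label.split('-', 1) if '-' in label else ('B', label)` line,
-- identical in both Pythons, shared by both ports.
def pvSplitLabel (label : String) : String × String :=
  if PySem.Str.isIn "-" label = true then
    let ps := (PySem.Str.splitMax? label "-" 1).getD []
    (ps.getD 0 "", ps.getD 1 "")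
  else ("B", label)

-- ===== PORT A =====
-- one loop step of A; `current_entity` is None ↦ none; Python's truthiness test
-- `if current_entity and current_tokens` is `current_entity.getD "" ≠ "" ∧ current_tokens ≠ []`.
-- The render-and-flush block is inlined twice here and once more in the final flush,
-- exactly as A's Python repeats it.
def pvStepA : List (List (String × String)) × Option String × List String →
    String × String → List (List (String × String)) × Option String × List String
  | (entities, current_entity, current_tokens), (token, label) =>
    if PySem.Str.startswith token "[" = true ∧ PySem.Str.endswith token "]" = true then
      (entities, current_entity, current_tokens)
    else if label = "O" then
      (if current_entity.getD "" ≠ "" ∧ current_tokens ≠ [] then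
        let full_text := current_tokens.foldl (fun ft t =>
          if PySem.Str.startswith t "##" = true then ft ++ PySem.Str.slice t (some 2) none
          else if ft ≠ "" ∧ PySem.Str.endswith ft " " = false then ft ++ " " ++ t
          else ft ++ t) ""
        if PySem.Str.strip full_text ≠ "" then
          entities ++ [[("text", PySem.Str.strip full_text), ("label", current_entity.getD "")]]
        else entities
      else entities, none, [])
    else
      let bt := pvSplitLabel label
      if bt.1 = "B" then
        (if current_entity.getD "" ≠ "" ∧ current_tokens ≠ [] then
          let full_text := current_tokens.foldl (fun ft t =>
            if PySem.Str.startswith t "##" = true then ft ++ PySem.Str.slice t (some 2) none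
            else if ft ≠ "" ∧ PySem.Str.endswith ft " " = false then ft ++ " " ++ t
            else ft ++ t) ""
          if PySem.Str.strip full_text ≠ "" then
            entities ++ [[("text", PySem.Str.strip full_text), ("label", current_entity.getD "")]]
          else entities
        else entities, some bt.2, [token])
      else if bt.1 = "I" ∧ current_entity = some bt.2 ∧ current_tokens ≠ [] then
        (entities, current_entity, current_tokens ++ [token])
      else (entities, current_entity, current_tokens)

def reconstruct_entities_from_bio_py (tokens : List String) (labels : List String) :
    List (List (String × String)) :=
  let st := (tokens.zip labels).foldl pvStepA ([], none, [])
  if st.2.1.getD "" ≠ "" ∧ st.2.2 ≠ [] then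
    let full_text := st.2.2.foldl (fun ft t =>
      if PySem.Str.startswith t "##" = true then ft ++ PySem.Str.slice t (some 2) none
      else if ft ≠ "" ∧ PySem.Str.endswith ft " " = false then ft ++ " " ++ t
      else ft ++ t) ""
    if PySem.Str.strip full_text ≠ "" then
      st.1 ++ [[("text", PySem.Str.strip full_text), ("label", st.2.1.getD "")]]
    else st.1
  else st.1

-- ===== PORT B =====
-- pass 1: segmentation step (B's first loop).  `segments[-1]` exists whenever
-- open_type is not None, so the `| none => []` arm is unreachable from the initial state.
def pvSegStep : List (String × List String) × Option String → String × String →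
    List (String × List String) × Option String
  | (segments, open_type), (token, label) =>
    if PySem.Str.startswith token "[" = true ∧ PySem.Str.endswith token "]" = true then
      (segments, open_type)
    else if label = "O" then (segments, none)
    else
      let bt := pvSplitLabel label
      if bt.1 = "B" then (segments ++ [(bt.2, [token])], some bt.2)
      else if bt.1 = "I" ∧ open_type = some bt.2 then
        (segments.dropLast ++
          (match segments.getLast? with
           | some sg => [(sg.1, sg.2 ++ [token])]
           | none => []), open_type)
      else (segments, open_type)

-- pass 2 helper: render one segment's token list (B's inner loop).
def pvRender (toks : List String) : String :=
  toks.foldl (fun ft t =>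
    if PySem.Str.startswith t "##" = true then ft ++ PySem.Str.slice t (some 2) none
    else if ft ≠ "" ∧ PySem.Str.endswith ft " " = false then ft ++ " " ++ t
    else ft ++ t) ""

def reconstruct_entities_from_bio_py_alt (tokens : List String) (labels : List String) :
    List (List (String × String)) :=
  let segments := ((tokens.zip labels).foldl pvSegStep ([], none)).1
  segments.foldl (fun entities sg =>
    if sg.1 ≠ "" ∧ PySem.Str.strip (pvRender sg.2) ≠ "" then
      entities ++ [[("text", PySem.Str.strip (pvRender sg.2)), ("label", sg.1)]]
    else entities) []

-- ===== PRECONDITION & SPEC =====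
def Spec_reconstruct_entities_from_bio_py (tokens : List String) (labels : List String) (out : List (List (String × String))) : Prop := out = reconstruct_entities_from_bio_py_alt tokens labels
instance (tokens : List String) (labels : List String) (out : List (List (String × String))) : Decidable (Spec_reconstruct_entities_from_bio_py tokens labels out) := by unfold Spec_reconstruct_entities_from_bio_py; infer_instance

-- ===== CLAIM (what is proved, stated in full; the proofs are below) =====
def Claim_equal_reconstruct_entities_from_bio_py : Prop := ∀ (tokens : List String) (labels : List String), Dom_reconstruct_entities_from_bio_py tokens labels → Spec_reconstruct_entities_from_bio_py tokens labels (reconstruct_entities_from_bio_py tokens labels)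

-- ===== LEMMAS AND PROOFS =====

-- B's pass 2 as a function of the segment list.
def pvEmit (segments : List (String × List String)) : List (List (String × String)) :=
  segments.foldl (fun entities sg =>
    if sg.1 ≠ "" ∧ PySem.Str.strip (pvRender sg.2) ≠ "" then
      entities ++ [[("text", PySem.Str.strip (pvRender sg.2)), ("label", sg.1)]]
    else entities) []

-- A's final flush, as a function of A's loop state (literally port A's tail).
def pvFinishA (st : List (List (String × String)) × Option String × List String) :
    List (List (String × String)) :=
  if st.2.1.getD "" ≠ "" ∧ st.2.2 ≠ [] then
    let full_text := st.2.2.foldl (fun ft t =>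
      if PySem.Str.startswith t "##" = true then ft ++ PySem.Str.slice t (some 2) none
      else if ft ≠ "" ∧ PySem.Str.endswith ft " " = false then ft ++ " " ++ t
      else ft ++ t) ""
    if PySem.Str.strip full_text ≠ "" then
      st.1 ++ [[("text", PySem.Str.strip full_text), ("label", st.2.1.getD "")]]
    else st.1
  else st.1

-- A's pending (still-open) segment, as B's pass 1 holds it.
def pvPend : Option String → List String → List (String × List String)
  | none, _ => []
  | some l, toks => [(l, toks)]

@[simp] theorem pvPend_none (toks : List String) : pvPend none toks = [] := rfl
@[simp] theorem pvPend_some (l : String) (toks : List String) :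
    pvPend (some l) toks = [(l, toks)] := rfl

-- the inline render fold IS pvRender
theorem pvRender_fold (toks : List String) : toks.foldl (fun ft t =>
    if PySem.Str.startswith t "##" = true then ft ++ PySem.Str.slice t (some 2) none
    else if ft ≠ "" ∧ PySem.Str.endswith ft " " = false then ft ++ " " ++ t
    else ft ++ t) "" = pvRender toks := rfl

-- A's inline flush block appends exactly what B's pass 2 emits for the pending segment.
theorem pvFlushIf_eq (es : List (List (String × String))) (cur : Option String)
    (toks : List String) :
    (if cur.getD "" ≠ "" ∧ toks ≠ [] then
      if PySem.Str.strip (pvRender toks) ≠ "" then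
        es ++ [[("text", PySem.Str.strip (pvRender toks)), ("label", cur.getD "")]]
      else es
    else es) = es ++ pvEmit (pvPend cur toks) := by
  cases cur with
  | none => simp [pvEmit]
  | some ce =>
    by_cases hce : ce = ""
    · subst hce; simp [pvEmit]
    · by_cases ht : toks = []
      · subst ht
        simp [pvEmit, pvRender, show PySem.Str.strip "" = "" from rfl]
      · by_cases hs : PySem.Str.strip (pvRender toks) = ""
        · simp [pvEmit, hce, ht, hs]
        · simp [pvEmit, hce, ht, hs]

theorem pvEmit_shift (s : List (String × List String))
    (acc : List (List (String × String))) :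
    s.foldl (fun entities sg =>
      if sg.1 ≠ "" ∧ PySem.Str.strip (pvRender sg.2) ≠ "" then
        entities ++ [[("text", PySem.Str.strip (pvRender sg.2)), ("label", sg.1)]]
      else entities) acc = acc ++ pvEmit s := by
  induction s generalizing acc with
  | nil => simp [pvEmit]
  | cons sg rest ih =>
    simp only [pvEmit, List.foldl_cons]
    by_cases hsg : sg.1 ≠ "" ∧ PySem.Str.strip (pvRender sg.2) ≠ ""
    · rw [if_pos hsg, if_pos hsg, ih, ih, List.nil_append, List.append_assoc]
    · rw [if_neg hsg, if_neg hsg, ih, ih, List.nil_append]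

theorem pvEmit_append (p s : List (String × List String)) :
    pvEmit (p ++ s) = pvEmit p ++ pvEmit s := by
  simp only [pvEmit, List.foldl_append]
  rw [show (p.foldl (fun entities sg =>
      if sg.1 ≠ "" ∧ PySem.Str.strip (pvRender sg.2) ≠ "" then
        entities ++ [[("text", PySem.Str.strip (pvRender sg.2)), ("label", sg.1)]]
      else entities) [] : List (List (String × String))) = pvEmit p from rfl]
  exact pvEmit_shift s (pvEmit p)

-- pass 1 never touches segments before the last one: a prefix is carried through one step.
theorem pvSegStep_shift (p s : List (String × List String)) (c : Option String)
    (tl : String × String) (h : c = none ∨ s ≠ []) :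
    pvSegStep (p ++ s, c) tl = (p ++ (pvSegStep (s, c) tl).1, (pvSegStep (s, c) tl).2) ∧
    ((pvSegStep (s, c) tl).2 = none ∨ (pvSegStep (s, c) tl).1 ≠ []) := by
  obtain ⟨t, l⟩ := tl
  simp only [pvSegStep]
  by_cases hbr : PySem.Str.startswith t "[" = true ∧ PySem.Str.endswith t "]" = true
  · simp only [if_pos hbr]; exact ⟨by trivial, h⟩
  · simp only [if_neg hbr]
    by_cases hO : l = "O"
    · simp only [if_pos hO]; exact ⟨by trivial, Or.inl (by trivial)⟩
    · simp only [if_neg hO]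
      by_cases hB : (pvSplitLabel l).1 = "B"
      · simp only [if_pos hB]
        exact ⟨by simp, Or.inr (by simp)⟩
      · simp only [if_neg hB]
        by_cases hI : (pvSplitLabel l).1 = "I" ∧ c = some (pvSplitLabel l).2
        · simp only [if_pos hI]
          have hs : s ≠ [] := by
            rcases h with h | h
            · rw [h] at hI; exact absurd hI.2 (by simp)
            · exact h
          constructor
          · rw [List.getLast?_append_of_ne_nil p hs, List.dropLast_append_of_ne_nil hs,
              List.append_assoc]
          · refine Or.inr ?_
            obtain ⟨x, hx⟩ := Option.isSome_iff_exists.mp (List.getLast?_isSome.mpr hs)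
            simp [hx]
        · simp only [if_neg hI]; exact ⟨by trivial, h⟩

theorem pvSeg_prefix (L : List (String × String)) (p s : List (String × List String))
    (c : Option String) (h : c = none ∨ s ≠ []) :
    L.foldl pvSegStep (p ++ s, c) =
      (p ++ (L.foldl pvSegStep (s, c)).1, (L.foldl pvSegStep (s, c)).2) := by
  induction L generalizing s c with
  | nil => simp
  | cons tl L ih =>
    simp only [List.foldl_cons]
    obtain ⟨h1, h2⟩ := pvSegStep_shift p s c tl h
    rw [h1]
    have := ih (pvSegStep (s, c) tl).1 (pvSegStep (s, c) tl).2 h2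
    simpa using this

-- main invariant: running A from (es, cur, toks) and flushing at the end equals
-- es ++ what B's pass 2 emits from B's pass 1 started at the pending segment.
theorem pvMain (L : List (String × String)) (es : List (List (String × String)))
    (cur : Option String) (toks : List String) (h : cur = none ∨ toks ≠ []) :
    pvFinishA (L.foldl pvStepA (es, cur, toks)) =
      es ++ pvEmit ((L.foldl pvSegStep (pvPend cur toks, cur)).1) := by
  induction L generalizing es cur toks with
  | nil =>
    simp only [List.foldl_nil, pvFinishA, pvRender_fold]
    exact pvFlushIf_eq es cur toks
  | cons tl L ih =>
    obtain ⟨t, l⟩ := tl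
    simp only [List.foldl_cons, pvStepA, pvSegStep]
    by_cases hbr : PySem.Str.startswith t "[" = true ∧ PySem.Str.endswith t "]" = true
    · simp only [if_pos hbr]
      exact ih es cur toks h
    · simp only [if_neg hbr]
      by_cases hO : l = "O"
      · simp only [if_pos hO, pvRender_fold, pvFlushIf_eq]
        rw [ih (es ++ pvEmit (pvPend cur toks)) none [] (Or.inl rfl)]
        have hp := pvSeg_prefix L (pvPend cur toks) [] none (Or.inl rfl)
        rw [List.append_nil] at hp
        rw [hp]
        simp [pvEmit_append, List.append_assoc]
      · simp only [if_neg hO]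
        by_cases hB : (pvSplitLabel l).1 = "B"
        · simp only [if_pos hB, pvRender_fold, pvFlushIf_eq]
          rw [ih (es ++ pvEmit (pvPend cur toks)) (some (pvSplitLabel l).2) [t]
            (Or.inr (by simp))]
          have hp := pvSeg_prefix L (pvPend cur toks) [((pvSplitLabel l).2, [t])]
            (some (pvSplitLabel l).2) (Or.inr (by simp))
          rw [hp]
          simp [pvEmit_append, List.append_assoc]
        · simp only [if_neg hB]
          by_cases hI : (pvSplitLabel l).1 = "I" ∧ cur = some (pvSplitLabel l).2
          · have ht : toks ≠ [] := by
              rcases h with h' | h'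
              · rw [h'] at hI; exact absurd hI.2 (by simp)
              · exact h'
            simp only [if_pos hI, if_pos (show (pvSplitLabel l).1 = "I" ∧
              cur = some (pvSplitLabel l).2 ∧ toks ≠ [] from ⟨hI.1, hI.2, ht⟩)]
            rw [hI.2]
            simpa using ih es (some (pvSplitLabel l).2) (toks ++ [t]) (Or.inr (by simp))
          · have hA : ¬ ((pvSplitLabel l).1 = "I" ∧ cur = some (pvSplitLabel l).2 ∧
                toks ≠ []) := fun hc => hI ⟨hc.1, hc.2.1⟩
            simp only [if_neg hI, if_neg hA]
            exact ih es cur toks h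

theorem portA_eq (tokens labels : List String) :
    reconstruct_entities_from_bio_py tokens labels =
      pvFinishA ((tokens.zip labels).foldl pvStepA ([], none, [])) := rfl

theorem portB_eq (tokens labels : List String) :
    reconstruct_entities_from_bio_py_alt tokens labels =
      pvEmit (((tokens.zip labels).foldl pvSegStep ([], none)).1) := rfl

-- ===== VERDICT (by name: the statement is the Claim_ definition above) =====
theorem reconstruct_entities_from_bio_py_spec : Claim_equal_reconstruct_entities_from_bio_py := by
  intro tokens labels _
  unfold Spec_reconstruct_entities_from_bio_py
  rw [portA_eq, portB_eq]
  simpa using pvMain (tokens.zip labels) [] none [] (Or.inl rfl)
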